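-- pv_equiv track=rewrite | github.com/the-omega-institute/automath | theory/2026_golden_ratio_driven_scan_projection_generation_recursive_emergence/scripts/exp_m2_level3_xi_delta0_order6_inertia_audit.py | adjacency_points
-- ===== SOURCE A (Python) =====
-- from typing import Dict, FrozenSet, List, Sequence, Set, Tuple
--
-- F = 3
--
-- def _mod(x: int) -> int:
--     return x % F
--
-- Vec = Tuple[int, int, int, int]
--
-- Line = Vec
--
-- def dot_symplectic(x: Vec, y: Vec) -> int:
--     x1, x2, x3, x4 = x
--     y1, y2, y3, y4 = y
--     return _mod(x1 * y3 + x2 * y4 - x3 * y1 - x4 * y2)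
--
-- def adjacency_points(lines: Sequence[Line]) -> List[List[int]]:
--     # Orthogonal adjacency on P(V): distinct lines with symplectic pairing 0.
--     n = len(lines)
--     idx = {lines[i]: i for i in range(n)}
--     A = [[0] * n for _ in range(n)]
--     for i, a in enumerate(lines):
--         for j, b in enumerate(lines):
--             if i == j:
--                 continue
--             if dot_symplectic(a, b) == 0:
--                 A[i][j] = 1
--     return A
-- ===== SOURCE B (Python) =====
-- F = 3
--
-- def _mod(x: int) -> int:
--     return x % F
--
-- def dot_symplectic(x, y):
--     x1, x2, x3, x4 = x
--     y1, y2, y3, y4 = y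
--     return _mod(x1 * y3 + x2 * y4 - x3 * y1 - x4 * y2)
--
-- def adjacency_points(lines):
--     # The pairing only depends on both arguments mod 3, so group the lines by
--     # their residue class (at most 81 classes): the inner scan over all lines is
--     # replaced by a scan over the class index, one pairing evaluation per class.
--     n = len(lines)
--     groups = {}
--     for j, b in enumerate(lines):
--         key = (b[0] % F, b[1] % F, b[2] % F, b[3] % F)
--         groups.setdefault(key, []).append(j)
--     A = [[0] * n for _ in range(n)]
--     for i, a in enumerate(lines):
--         row = A[i]
--         for key, js in groups.items():
--             if dot_symplectic(a, key) == 0: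
--                 for j in js:
--                     if j != i:
--                         row[j] = 1
--     return A
-- ===== Notes on version B (the rewrite author's own statement) =====
-- stated objective: faster
-- what changed: B first groups line indices by their coordinate residues mod 3 in a dict (at most 81 classes, since the pairing only depends on the arguments mod 3), then for each line evaluates the pairing once per class key and marks every off-diagonal index of an orthogonal class, instead of A's full n x n pairwise scan with one pairing evaluation per ordered pair; A's dead index dict is dropped.
import Mathlib
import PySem

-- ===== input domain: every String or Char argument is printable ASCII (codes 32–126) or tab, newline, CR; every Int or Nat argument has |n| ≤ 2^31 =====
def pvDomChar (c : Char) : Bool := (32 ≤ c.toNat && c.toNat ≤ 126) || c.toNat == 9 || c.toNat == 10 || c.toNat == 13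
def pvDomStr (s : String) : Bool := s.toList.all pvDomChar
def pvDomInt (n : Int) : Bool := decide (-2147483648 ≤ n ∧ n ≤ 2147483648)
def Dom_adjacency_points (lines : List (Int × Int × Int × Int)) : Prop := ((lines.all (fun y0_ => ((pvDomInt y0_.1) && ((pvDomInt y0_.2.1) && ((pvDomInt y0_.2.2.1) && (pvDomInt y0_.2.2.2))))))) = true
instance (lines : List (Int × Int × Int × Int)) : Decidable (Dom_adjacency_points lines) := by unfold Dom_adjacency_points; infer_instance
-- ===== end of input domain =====

-- B groups the line indices by their coordinate residues mod 3 (the pairing only depends on the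
-- arguments mod 3), then evaluates the pairing once per residue class instead of once per ordered
-- pair, replacing A's inner scan over all lines by a scan over at most 81 class keys (objective: faster).

-- ===== PORT A =====
def pyF : Int := 3

def pyMod (x : Int) : Int := PySem.Int.mod x pyF

def dot_symplectic (x y : Int × Int × Int × Int) : Int :=
  pyMod (x.1 * y.2.2.1 + x.2.1 * y.2.2.2 - x.2.2.1 * y.1 - x.2.2.2 * y.2.1)

-- 'A[i][j] = 1' on a list-of-lists matrix (indices from enumerate are ≥ 0, hence .toNat)
def upd (A : List (List Int)) (i j : Nat) : List (List Int) :=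
  A.modify i (fun row => row.set j 1)

def adjacency_points (lines : List (Int × Int × Int × Int)) : List (List Int) :=
  let n := lines.length
  -- Python builds a dict 'idx = {lines[i]: i for i in range(n)}' and never uses it; kept, unused.
  let _idx : PySem.Dict (Int × Int × Int × Int) Int :=
    (PySem.List.pyRange 0 (n : Int) 1).foldl
      (fun d i => d.insert (PySem.List.pyGetD lines i (0, 0, 0, 0)) i) PySem.Dict.empty
  let A0 := List.replicate n (List.replicate n (0 : Int))
  (PySem.List.enumerate lines 0).foldl (fun A ia =>
    (PySem.List.enumerate lines 0).foldl (fun A jb =>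
      if ia.1 == jb.1 then A
      else if dot_symplectic ia.2 jb.2 == 0 then upd A ia.1.toNat jb.1.toNat
      else A) A) A0

-- ===== PORT B =====
-- '(b[0] % F, b[1] % F, b[2] % F, b[3] % F)'
def keyOf (b : Int × Int × Int × Int) : Int × Int × Int × Int :=
  (pyMod b.1, pyMod b.2.1, pyMod b.2.2.1, pyMod b.2.2.2)

-- 'groups.setdefault(key, []).append(j)' over enumerate(lines) = dict.modify with append
def buildGroups (lines : List (Int × Int × Int × Int)) :
    PySem.Dict (Int × Int × Int × Int) (List Int) :=
  (PySem.List.enumerate lines 0).foldl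
    (fun d jb => d.modify (keyOf jb.2) [] (fun v => v ++ [jb.1])) PySem.Dict.empty

def adjacency_points_alt (lines : List (Int × Int × Int × Int)) : List (List Int) :=
  let n := lines.length
  let groups := buildGroups lines
  let A0 := List.replicate n (List.replicate n (0 : Int))
  (PySem.List.enumerate lines 0).foldl (fun A ia =>
    groups.items.foldl (fun A kv =>
      if dot_symplectic ia.2 kv.1 == 0 then
        -- 'row = A[i]; ... row[j] = 1' mutates row i of A in place = upd A i j
        kv.2.foldl (fun A j => if j == ia.1 then A else upd A ia.1.toNat j.toNat) A
      else A) A) A0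

-- ===== PRECONDITION & SPEC =====
def Spec_adjacency_points (lines : List (Int × Int × Int × Int)) (out : List (List Int)) : Prop := out = adjacency_points_alt lines
instance (lines : List (Int × Int × Int × Int)) (out : List (List Int)) : Decidable (Spec_adjacency_points lines out) := by unfold Spec_adjacency_points; infer_instance

-- ===== CLAIM (what is proved, stated in full; the proofs are below) =====
def Claim_equal_adjacency_points : Prop := ∀ (lines : List (Int × Int × Int × Int)), Dom_adjacency_points lines → Spec_adjacency_points lines (adjacency_points lines)

-- ===== LEMMAS AND PROOFS =====

-- entry (p,q) of a list-of-lists matrix, total form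
def ent (A : List (List Int)) (p q : Nat) : Int := ((A[p]?.getD [])[q]?.getD 0)

def applyAll (ps : List (Nat × Nat)) (A : List (List Int)) : List (List Int) :=
  ps.foldl (fun A p => upd A p.1 p.2) A

lemma upd_length (A : List (List Int)) (i j : Nat) : (upd A i j).length = A.length := by
  simp [upd]

lemma upd_rowlen (A : List (List Int)) (i j p : Nat) :
    ((upd A i j)[p]?.getD []).length = (A[p]?.getD []).length := by
  simp only [upd, List.getElem?_modify]
  cases A[p]? with
  | none => rfl
  | some r =>
    simp only [Option.getD_some]
    split_ifs <;> simp

lemma ent_upd (A : List (List Int)) (i j p q : Nat)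
    (hp : p < A.length) (hq : q < (A[p]?.getD []).length) :
    ent (upd A i j) p q = if (i, j) = (p, q) then 1 else ent A p q := by
  have hAp : A[p]? = some (A[p]'hp) := List.getElem?_eq_getElem hp
  simp only [ent, upd, List.getElem?_modify, hAp, Option.getD_some] at *
  by_cases hip : i = p
  · subst hip
    by_cases hjq : j = q
    · subst hjq
      simp [hq]
    · simp [hjq, Prod.ext_iff]
  · simp [hip, Prod.ext_iff]

lemma applyAll_length (ps : List (Nat × Nat)) (A : List (List Int)) :
    (applyAll ps A).length = A.length := by
  induction ps generalizing A with
  | nil => rfl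
  | cons hd tl ih => simpa [applyAll, List.foldl_cons, upd_length] using
      (ih (upd A hd.1 hd.2)).trans (upd_length A hd.1 hd.2)

lemma applyAll_rowlen (ps : List (Nat × Nat)) (A : List (List Int)) (p : Nat) :
    ((applyAll ps A)[p]?.getD []).length = (A[p]?.getD []).length := by
  induction ps generalizing A with
  | nil => rfl
  | cons hd tl ih => simpa [applyAll, List.foldl_cons] using
      (ih (upd A hd.1 hd.2)).trans (upd_rowlen A hd.1 hd.2 p)

lemma applyAll_ent (ps : List (Nat × Nat)) (A : List (List Int)) (p q : Nat)
    (hp : p < A.length) (hq : q < (A[p]?.getD []).length) :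
    ent (applyAll ps A) p q = if (p, q) ∈ ps then 1 else ent A p q := by
  induction ps generalizing A with
  | nil => simp [applyAll]
  | cons hd tl ih =>
    have hp' : p < (upd A hd.1 hd.2).length := by rw [upd_length]; exact hp
    have hq' : q < ((upd A hd.1 hd.2)[p]?.getD []).length := by rw [upd_rowlen]; exact hq
    have := ih (upd A hd.1 hd.2) hp' hq'
    have hcons : applyAll (hd :: tl) A = applyAll tl (upd A hd.1 hd.2) := rfl
    rw [hcons, this, ent_upd A hd.1 hd.2 p q hp hq]
    by_cases hm : (p, q) ∈ tl
    · simp [hm]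
    · by_cases he : hd = (p, q)
      · simp [he, hm]
      · have : (p, q) ≠ hd := fun h => he h.symm
        simp [hm, he, this]

lemma applyAll_append (ps qs : List (Nat × Nat)) (A : List (List Int)) :
    applyAll (ps ++ qs) A = applyAll qs (applyAll ps A) := by
  simp [applyAll, List.foldl_append]

lemma foldl_applyAll {γ : Type} (l : List γ) (g : γ → List (Nat × Nat)) (A0 : List (List Int)) :
    l.foldl (fun A x => applyAll (g x) A) A0 = applyAll (l.flatMap g) A0 := by
  induction l generalizing A0 with
  | nil => rfl
  | cons hd tl ih => simp [List.foldl_cons, List.flatMap_cons, applyAll_append, ih]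

lemma foldl_foldl {α β : Type} (l : List α) (m : α → List β)
    (g : List (List Int) → α → β → List (List Int)) (A : List (List Int)) :
    l.foldl (fun A x => (m x).foldl (fun A y => g A x y) A) A
      = (l.flatMap (fun x => (m x).map (Prod.mk x))).foldl (fun A p => g A p.1 p.2) A := by
  induction l generalizing A with
  | nil => rfl
  | cons hd tl ih =>
    simp only [List.foldl_cons, List.flatMap_cons, List.foldl_append, List.foldl_map]
    exact ih _

lemma foldl_skip {γ : Type} (l : List γ) (c1 c2 : γ → Bool) (f1 f2 : γ → Nat) (A0 : List (List Int)) :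
    l.foldl (fun A x => if c1 x then A else if c2 x then upd A (f1 x) (f2 x) else A) A0
      = applyAll ((l.filter (fun x => !c1 x && c2 x)).map (fun x => (f1 x, f2 x))) A0 := by
  induction l generalizing A0 with
  | nil => rfl
  | cons hd tl ih =>
    cases hc1 : c1 hd <;> cases hc2 : c2 hd <;>
      simp [hc1, hc2, applyAll, ih]

lemma foldl_skip1 {γ : Type} (l : List γ) (c : γ → Bool) (f1 f2 : γ → Nat) (A0 : List (List Int)) :
    l.foldl (fun A x => if c x then A else upd A (f1 x) (f2 x)) A0
      = applyAll ((l.filter (fun x => !c x)).map (fun x => (f1 x, f2 x))) A0 := by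
  induction l generalizing A0 with
  | nil => rfl
  | cons hd tl ih =>
    cases hc : c hd <;> simp [hc, applyAll, ih]

-- pair lists the two ports update with
def pairsA (lines : List (Int × Int × Int × Int)) : List (Nat × Nat) :=
  (((PySem.List.enumerate lines 0).flatMap
      (fun x => (PySem.List.enumerate lines 0).map (Prod.mk x))).filter
    (fun p : (Int × (Int × Int × Int × Int)) × (Int × (Int × Int × Int × Int)) =>
      !(p.1.1 == p.2.1) && (dot_symplectic p.1.2 p.2.2 == 0))).map
    (fun p => (p.1.1.toNat, p.2.1.toNat))

def pairsB (lines : List (Int × Int × Int × Int)) : List (Nat × Nat) :=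
  (PySem.List.enumerate lines 0).flatMap (fun ia =>
    (buildGroups lines).items.flatMap (fun kv =>
      if dot_symplectic ia.2 kv.1 == 0 then
        (kv.2.filter (fun j => !(j == ia.1))).map (fun j => (ia.1.toNat, j.toNat))
      else []))

lemma A_eq (lines : List (Int × Int × Int × Int)) :
    adjacency_points lines
      = applyAll (pairsA lines)
          (List.replicate lines.length (List.replicate lines.length (0 : Int))) := by
  show (PySem.List.enumerate lines 0).foldl _ _ = _
  exact (foldl_foldl (PySem.List.enumerate lines 0) (fun _ => PySem.List.enumerate lines 0)
      (fun A x y => if x.1 == y.1 then A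
        else if dot_symplectic x.2 y.2 == 0 then upd A x.1.toNat y.1.toNat else A) _).trans
    (foldl_skip (γ := (Int × (Int × Int × Int × Int)) × (Int × (Int × Int × Int × Int))) _
      (fun p => p.1.1 == p.2.1) (fun p => dot_symplectic p.1.2 p.2.2 == 0)
      (fun p => p.1.1.toNat) (fun p => p.2.1.toNat) _)

lemma B_eq (lines : List (Int × Int × Int × Int)) :
    adjacency_points_alt lines
      = applyAll (pairsB lines)
          (List.replicate lines.length (List.replicate lines.length (0 : Int))) := by
  show (PySem.List.enumerate lines 0).foldl _ _ = _
  rw [show ∀ A0, (PySem.List.enumerate lines 0).foldl (fun A ia =>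
      (buildGroups lines).items.foldl (fun A kv =>
        if dot_symplectic ia.2 kv.1 == 0 then
          kv.2.foldl (fun A j => if j == ia.1 then A else upd A ia.1.toNat j.toNat) A
        else A) A) A0
      = (PySem.List.enumerate lines 0).foldl (fun A ia =>
          applyAll ((buildGroups lines).items.flatMap (fun kv =>
            if dot_symplectic ia.2 kv.1 == 0 then
              (kv.2.filter (fun j => !(j == ia.1))).map (fun j => (ia.1.toNat, j.toNat))
            else [])) A) A0 from fun A0 => ?_, foldl_applyAll]
  · rfl
  · apply PySem.List.foldl_congr_mem
    intro A ia _
    rw [← foldl_applyAll]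
    apply PySem.List.foldl_congr_mem
    intro A kv _
    cases hc : dot_symplectic ia.2 kv.1 == 0
    · simp [applyAll]
    · exact foldl_skip1 kv.2 (fun j => j == ia.1) (fun _ => ia.1.toNat) (fun j => j.toNat) A

-- the pairing only depends on its second argument mod 3
lemma dot_keyOf (a b : Int × Int × Int × Int) :
    dot_symplectic a (keyOf b) = dot_symplectic a b := by
  obtain ⟨a1, a2, a3, a4⟩ := a
  obtain ⟨b1, b2, b3, b4⟩ := b
  simp only [dot_symplectic, keyOf, pyMod, pyF,
    PySem.Int.mod_eq_emod_of_pos (by norm_num : (0 : Int) < 3)]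
  have h : ∀ z : Int, z % 3 ≡ z [ZMOD 3] := fun z => Int.emod_emod_of_dvd z dvd_rfl
  exact ((((h b3).mul_left a1).add ((h b4).mul_left a2)).sub ((h b1).mul_left a3)).sub
    ((h b2).mul_left a4)

lemma nodup_keys_groups (lines : List (Int × Int × Int × Int)) :
    (buildGroups lines).keys.Nodup := by
  unfold buildGroups
  exact PySem.Dict.nodup_keys_foldl_modify_key (PySem.List.enumerate lines 0)
    (fun jb => keyOf jb.2) [] (fun _ jb v => v ++ [jb.1]) PySem.Dict.empty
    PySem.Dict.nodup_keys_empty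

lemma groups_getD (lines : List (Int × Int × Int × Int)) (c : Int × Int × Int × Int) :
    (buildGroups lines).getD c []
      = (((PySem.List.enumerate lines 0).map (fun jb => (keyOf jb.2, jb.1))).filter
          (fun p => p.1 == c)).map (fun p => p.2) := by
  have : buildGroups lines
      = ((PySem.List.enumerate lines 0).map (fun jb => (keyOf jb.2, jb.1))).foldl
          (fun d p => d.modify p.1 [] (fun v => v ++ [p.2])) PySem.Dict.empty := by
    rw [List.foldl_map]; rfl
  rw [this, PySem.Dict.getD_foldl_modify_append]
  simp

lemma memA (lines : List (Int × Int × Int × Int)) {p q : Nat}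
    (hp : p < lines.length) (hq : q < lines.length) :
    ((p, q) ∈ pairsA lines) ↔ (p ≠ q ∧ dot_symplectic (lines[p]'hp) (lines[q]'hq) = 0) := by
  simp only [pairsA, List.mem_map, List.mem_filter, List.mem_flatMap,
    PySem.List.mem_enumerate_iff]
  constructor
  · rintro ⟨a, ⟨⟨a1, ⟨k, hk, rfl⟩, a2, ⟨k', hk', rfl⟩, rfl⟩, hcond⟩, heq⟩
    simp only [zero_add, Int.toNat_natCast] at hcond heq
    obtain ⟨rfl, rfl⟩ := Prod.mk.injEq .. ▸ Prod.ext_iff.mp heq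
    simp only [Bool.and_eq_true, Bool.not_eq_true', beq_eq_false_iff_ne, ne_eq,
      beq_iff_eq] at hcond
    exact ⟨fun h => hcond.1 (by exact_mod_cast h), hcond.2⟩
  · rintro ⟨hne, hdot⟩
    have hne' : (p : Int) ≠ (q : Int) := by exact_mod_cast hne
    refine ⟨(((p : Int), lines[p]'hp), ((q : Int), lines[q]'hq)),
      ⟨⟨_, ⟨p, hp, by simp⟩, _, ⟨q, hq, by simp⟩, rfl⟩, by simp [hne', hdot]⟩, by simp⟩

lemma memB (lines : List (Int × Int × Int × Int)) {p q : Nat}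
    (hp : p < lines.length) (hq : q < lines.length) :
    ((p, q) ∈ pairsB lines) ↔ (p ≠ q ∧ dot_symplectic (lines[p]'hp) (lines[q]'hq) = 0) := by
  simp only [pairsB, List.mem_flatMap, PySem.List.mem_enumerate_iff]
  constructor
  · rintro ⟨ia, ⟨k, hk, rfl⟩, x, hkv, hmem⟩
    simp only [zero_add] at hmem ⊢
    by_cases hc : dot_symplectic (lines[k]'hk) x.1 = 0
    · rw [if_pos (by simpa using hc)] at hmem
      simp only [List.mem_map, List.mem_filter] at hmem
      obtain ⟨j, ⟨hjv, hjne⟩, heq⟩ := hmem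
      -- j is an index whose line has residue class x.1
      have hch : (buildGroups lines).getD x.1 [] = x.2 :=
        PySem.Dict.getD_of_mem_items _ hkv (nodup_keys_groups lines) []
      rw [groups_getD] at hch
      rw [← hch] at hjv
      simp only [List.mem_map, List.mem_filter, PySem.List.mem_enumerate_iff] at hjv
      obtain ⟨a, ⟨⟨a1, ⟨m, hm, rfl⟩, rfl⟩, hkey⟩, rfl⟩ := hjv
      simp only [zero_add, beq_iff_eq] at hkey hjne heq
      rw [← hkey, dot_keyOf] at hc
      simp only [Int.toNat_natCast] at heq
      obtain ⟨rfl, rfl⟩ := Prod.mk.injEq .. ▸ Prod.ext_iff.mp heq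
      have hmk : ¬ (q : Int) = (p : Int) := by simpa using hjne
      exact ⟨fun h => hmk (by exact_mod_cast h.symm), hc⟩
    · rw [if_neg (by simpa using hc)] at hmem
      exact absurd hmem (List.not_mem_nil)
  · rintro ⟨hne, hdot⟩
    refine ⟨((p : Int), lines[p]'hp), ⟨p, hp, by simp⟩, ?_⟩
    -- the class of lines[q] is a key of groups; its bucket contains q
    set c := keyOf (lines[q]'hq) with hcdef
    have hkeys : c ∈ (buildGroups lines).keys := by
      rw [buildGroups, PySem.Dict.keys_foldl_modify_key]
      refine (PySem.Set.mem_update _ _ _).mpr (Or.inr ?_)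
      simp only [List.mem_map, PySem.List.mem_enumerate_iff]
      exact ⟨((q : Int), lines[q]'hq), ⟨q, hq, by simp⟩, rfl⟩
    obtain ⟨v, hv⟩ : ∃ v, (buildGroups lines).get? c = some v := by
      cases hg : (buildGroups lines).get? c with
      | none => exact absurd hkeys ((PySem.Dict.get?_eq_none_iff_not_mem_keys _ _).mp hg)
      | some v => exact ⟨v, rfl⟩
    refine ⟨(c, v), PySem.Dict.mem_items_of_get?_eq_some _ hv, ?_⟩
    have hgd : (buildGroups lines).getD c [] = v := PySem.Dict.getD_of_get?_eq_some _ [] hv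
    have hq' : (q : Int) ∈ v := by
      rw [← hgd, groups_getD]
      simp only [List.mem_map, List.mem_filter, PySem.List.mem_enumerate_iff]
      exact ⟨(c, (q : Int)), ⟨⟨((q : Int), lines[q]'hq), ⟨q, hq, by simp⟩, by rw [hcdef]⟩,
        by simp⟩, rfl⟩
    rw [if_pos (show (dot_symplectic (lines[p]'hp) c == 0) = true by
      rw [hcdef, dot_keyOf]; simpa using hdot)]
    simp only [List.mem_map, List.mem_filter]
    have hne' : (q : Int) ≠ (p : Int) := by exact_mod_cast Ne.symm hne
    exact ⟨(q : Int), ⟨hq', by simpa using hne'⟩, by simp⟩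

lemma ent_eq_getElem (A : List (List Int)) (p q : Nat) (hp : p < A.length)
    (hq : q < (A[p]'hp).length) : ent A p q = (A[p]'hp)[q]'hq := by
  simp [ent, List.getElem?_eq_getElem hp, List.getElem?_eq_getElem hq]

-- ===== VERDICT (by name: the statement is the Claim_ definition above) =====
theorem adjacency_points_spec : Claim_equal_adjacency_points := by
  intro lines _
  unfold Spec_adjacency_points
  rw [A_eq, B_eq]
  set n := lines.length with hn
  set A0 := List.replicate n (List.replicate n (0 : Int)) with hA0
  have hlen : ∀ ps, (applyAll ps A0).length = n := fun ps => by
    rw [applyAll_length]; simp [hA0]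
  have hrow : ∀ ps (p : Nat), ((applyAll ps A0)[p]?.getD []).length
      = ((A0[p]?.getD []).length) := fun ps p => applyAll_rowlen ps A0 p
  have hA0row : ∀ p, p < n → (A0[p]?.getD []) = List.replicate n (0 : Int) := by
    intro p hpn
    rw [hA0, List.getElem?_eq_getElem (by simpa using hpn)]
    simp
  apply List.ext_getElem (by rw [hlen, hlen])
  intro p hp1 hp2
  have hpn : p < n := by rw [← hlen (pairsA lines)]; exact hp1
  apply List.ext_getElem
  · have h1 : ((applyAll (pairsA lines) A0)[p]'hp1) = ((applyAll (pairsA lines) A0)[p]?.getD []) := by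
      rw [List.getElem?_eq_getElem hp1]; rfl
    have h2 : ((applyAll (pairsB lines) A0)[p]'hp2) = ((applyAll (pairsB lines) A0)[p]?.getD []) := by
      rw [List.getElem?_eq_getElem hp2]; rfl
    rw [h1, h2, hrow, hrow]
  intro q hq1 hq2
  have hqrow : ∀ ps (hpl : p < (applyAll ps A0).length),
      ((applyAll ps A0)[p]'hpl).length = n := by
    intro ps hpl
    have : ((applyAll ps A0)[p]'hpl) = ((applyAll ps A0)[p]?.getD []) := by
      rw [List.getElem?_eq_getElem hpl]; rfl
    rw [this, hrow, hA0row p hpn]; simp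
  have hqn : q < n := by rw [← hqrow (pairsA lines) hp1]; exact hq1
  rw [← ent_eq_getElem _ _ _ hp1 hq1, ← ent_eq_getElem _ _ _ hp2 hq2]
  have hA0len : A0.length = n := by simp [hA0]
  have hpA0 : p < A0.length := by rw [hA0len]; exact hpn
  have hqA0 : q < (A0[p]?.getD []).length := by rw [hA0row p hpn]; simpa using hqn
  rw [applyAll_ent _ _ _ _ hpA0 hqA0, applyAll_ent _ _ _ _ hpA0 hqA0]
  have hiff := (memA lines hpn hqn).trans (memB lines hpn hqn).symm
  by_cases hm : (p, q) ∈ pairsA lines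
  · rw [if_pos hm, if_pos (hiff.mp hm)]
  · rw [if_neg hm, if_neg (fun h => hm (hiff.mpr h))]
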